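-- pv_equiv track=rewrite | github.com/Nafisa41/Capsta | write_polygon.py | gen_all_branch
-- ===== SOURCE A (Python) =====
-- def gen_all_branch(input_features_str):
--     output = []
--     for i in range(8):
--         str = ""
--         if (i & 1) > 0:
--             str += "any "
--         else:
--             str += input_features_str[0] + " "
--
--         if (i & 2) > 0:
--             str += "any "
--         else:
--             str += input_features_str[1] + " "
--
--         if (i & 4) > 0:
--             str += "any"
--         else:
--             str += input_features_str[2]
--         output.append(str)
--     return output
-- ===== SOURCE B (Python) =====
-- def gen_all_branch(input_features_str):
--     f0, f1, f2 = input_features_str[0], input_features_str[1], input_features_str[2]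
--     out = []
--     for c2 in (f2, "any"):
--         for c1 in (f1, "any"):
--             for c0 in (f0, "any"):
--                 out.append(c0 + " " + c1 + " " + c2)
--     return out
-- ===== Notes on version B (the rewrite author's own statement) =====
-- stated objective: alternative
-- what changed: Replaces the single loop over i in range(8) with bit-mask tests by three nested loops over the two choices per position (feature or 'any'), with position 0 innermost so the output order is identical; the constant strings are joined directly instead of incrementally grown.
-- outside the precondition, e.g. on gen_all_branch(['a', 'b']): A raises IndexError, B raises IndexError
import Mathlib
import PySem

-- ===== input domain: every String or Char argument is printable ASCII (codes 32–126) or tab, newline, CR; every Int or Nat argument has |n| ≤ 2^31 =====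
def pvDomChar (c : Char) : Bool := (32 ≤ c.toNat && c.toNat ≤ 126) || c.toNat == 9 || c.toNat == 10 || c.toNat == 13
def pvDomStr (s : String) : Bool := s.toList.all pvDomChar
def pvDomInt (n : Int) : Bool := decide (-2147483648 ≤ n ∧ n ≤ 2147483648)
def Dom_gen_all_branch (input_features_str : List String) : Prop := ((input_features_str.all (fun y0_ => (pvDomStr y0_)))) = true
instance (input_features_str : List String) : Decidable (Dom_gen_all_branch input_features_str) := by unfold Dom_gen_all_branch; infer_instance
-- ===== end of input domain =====

-- B replaces the bit-masked single loop by three nested loops over the two choices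
-- per position (position 0 innermost), an alternative of the same cost.

-- ===== PORT A =====
def gen_all_branch (input_features_str : List String) : List String :=
  (PySem.List.pyRange 0 8 1).foldl (fun output i =>
    let s : String := ""
    let s := if (PySem.Int.band i 1) > 0 then s ++ "any "
             else s ++ PySem.List.pyGetD input_features_str 0 "" ++ " "
    let s := if (PySem.Int.band i 2) > 0 then s ++ "any "
             else s ++ PySem.List.pyGetD input_features_str 1 "" ++ " "
    let s := if (PySem.Int.band i 4) > 0 then s ++ "any"
             else s ++ PySem.List.pyGetD input_features_str 2 ""
    output ++ [s]) []

-- ===== PORT B =====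
def gen_all_branch_alt (input_features_str : List String) : List String :=
  let f0 := PySem.List.pyGetD input_features_str 0 ""
  let f1 := PySem.List.pyGetD input_features_str 1 ""
  let f2 := PySem.List.pyGetD input_features_str 2 ""
  ([f2, "any"]).foldl (fun out c2 =>
    ([f1, "any"]).foldl (fun out c1 =>
      ([f0, "any"]).foldl (fun out c0 =>
        out ++ [c0 ++ " " ++ c1 ++ " " ++ c2]) out) out) []

-- ===== PRECONDITION & SPEC =====
-- Pre_ excludes lists of fewer than 3 strings, on which A raises IndexError.
def Pre_gen_all_branch (input_features_str : List String) : Prop :=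
  3 ≤ input_features_str.length
instance (input_features_str : List String) : Decidable (Pre_gen_all_branch input_features_str) := by
  unfold Pre_gen_all_branch; infer_instance
def pvWitness_gen_all_branch : List String := ["a", "b", "c"]
def Spec_gen_all_branch (input_features_str : List String) (out : List String) : Prop := out = gen_all_branch_alt input_features_str
instance (input_features_str : List String) (out : List String) : Decidable (Spec_gen_all_branch input_features_str out) := by unfold Spec_gen_all_branch; infer_instance

-- ===== CLAIM (what is proved, stated in full; the proofs are below) =====
def Claim_equal_gen_all_branch : Prop := ∀ (input_features_str : List String), Dom_gen_all_branch input_features_str → Pre_gen_all_branch input_features_str → Spec_gen_all_branch input_features_str (gen_all_branch input_features_str)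

-- ===== LEMMAS AND PROOFS =====

-- ===== VERDICT (by name: the statement is the Claim_ definition above) =====
theorem gen_all_branch_spec : Claim_equal_gen_all_branch := by
  intro xs _ hpre
  unfold Pre_gen_all_branch at hpre
  match xs with
  | a :: b :: c :: rest =>
    have hr : PySem.List.pyRange 0 8 1 = [0, 1, 2, 3, 4, 5, 6, 7] := by decide
    simp [Spec_gen_all_branch, gen_all_branch, gen_all_branch_alt,
      PySem.List.pyGetD_ofNat', hr, PySem.Int.band,
      String.append_assoc]
    simp [← String.append_assoc]
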